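-- pv_equiv track=rewrite | github.com/alanbantug/calottery | fantasy.py | merge_or_not
-- ===== SOURCE A (Python) =====
-- def merge_or_not(combo_set, combo, inter_count):
--
--     temp = combo_set.copy()
--     temp.extend(combo)
--
--     dup = 0
--     fnd = []
--
--     for num in temp:
--         if num in fnd:
--             dup += 1
--         else:
--             fnd.append(num)
--
--     return True if dup <= inter_count else False
-- ===== SOURCE B (Python) =====
-- def merge_or_not(combo_set, combo, inter_count):
--
--     # phase 1: one pass building a frequency table
--     freq = {}
--     for num in combo_set + combo:
--         freq[num] = freq.get(num, 0) + 1
--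
--     # phase 2: reduce the table's values to the duplicate count
--     dup = 0
--     for c in freq.values():
--         dup += c - 1
--
--     return dup <= inter_count
-- ===== Notes on version B (the rewrite author's own statement) =====
-- stated objective: faster
-- what changed: Replaced the quadratic scan-with-list-membership duplicate count by a two-phase hash-table version: one pass builds a frequency dict, a second pass sums (count-1) over its values.
import Mathlib
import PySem

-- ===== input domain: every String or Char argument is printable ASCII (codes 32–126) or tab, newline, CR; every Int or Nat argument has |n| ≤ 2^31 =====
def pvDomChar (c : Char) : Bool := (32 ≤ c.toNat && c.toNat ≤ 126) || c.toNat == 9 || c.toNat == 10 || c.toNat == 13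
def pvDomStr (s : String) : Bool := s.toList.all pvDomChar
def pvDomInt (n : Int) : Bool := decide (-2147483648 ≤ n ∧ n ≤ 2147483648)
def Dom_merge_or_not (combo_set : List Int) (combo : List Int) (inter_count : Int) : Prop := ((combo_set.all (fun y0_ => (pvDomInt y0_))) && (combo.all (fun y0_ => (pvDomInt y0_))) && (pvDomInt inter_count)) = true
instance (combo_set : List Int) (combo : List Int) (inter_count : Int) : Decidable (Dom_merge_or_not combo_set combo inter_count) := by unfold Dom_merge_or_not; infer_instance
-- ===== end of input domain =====

-- B replaces A's quadratic membership-scan duplicate count by a linear two-phase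
-- frequency-table version (build counts, then sum (count-1) over the values).

-- ===== PORT A =====
-- temp = combo_set.copy(); temp.extend(combo); then the scan keeping (dup, fnd).
def merge_or_not (combo_set : List Int) (combo : List Int) (inter_count : Int) : Bool :=
  let temp := combo_set ++ combo
  let st := temp.foldl
    (fun (st : Int × List Int) num =>
      if st.2.contains num then (st.1 + 1, st.2) else (st.1, st.2 ++ [num]))
    ((0 : Int), ([] : List Int))
  if st.1 ≤ inter_count then true else false

-- ===== PORT B =====
def merge_or_not_alt (combo_set : List Int) (combo : List Int) (inter_count : Int) : Bool :=
  let freq := (combo_set ++ combo).foldl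
    (fun (d : PySem.Dict Int Int) num => d.insert num (d.getD num 0 + 1)) PySem.Dict.empty
  let dup := freq.values.foldl (fun s c => s + (c - 1)) (0 : Int)
  decide (dup ≤ inter_count)

-- ===== PRECONDITION & SPEC =====
def Spec_merge_or_not (combo_set : List Int) (combo : List Int) (inter_count : Int) (out : Bool) : Prop := out = merge_or_not_alt combo_set combo inter_count
instance (combo_set : List Int) (combo : List Int) (inter_count : Int) (out : Bool) : Decidable (Spec_merge_or_not combo_set combo inter_count out) := by unfold Spec_merge_or_not; infer_instance

-- ===== CLAIM (what is proved, stated in full; the proofs are below) =====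
def Claim_equal_merge_or_not : Prop := ∀ (combo_set : List Int) (combo : List Int) (inter_count : Int), Dom_merge_or_not combo_set combo inter_count → Spec_merge_or_not combo_set combo inter_count (merge_or_not combo_set combo inter_count)

-- ===== LEMMAS AND PROOFS =====

-- cast a Nat-valued list sum to Int
theorem sum_map_cast (l : List Int) (f : Int → Nat) :
    (l.map (fun k => ((f k : Int)))).sum = ((l.map f).sum : Int) := by
  induction l with
  | nil => simp
  | cons x xs ih => simp [ih]

-- Σ (c - 1) = Σ c - length
theorem sum_map_sub_one (l : List Int) :
    (l.map (fun c => c - 1)).sum = l.sum - l.length := by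
  induction l with
  | nil => simp
  | cons x xs ih => simp [ih]; ring

-- A's loop: the final dup counts the repetitions, measured by how little the seen-list grows.
theorem aLoop_fst (temp : List Int) :
    ∀ (dup : Int) (fnd : List Int),
    (temp.foldl
      (fun (st : Int × List Int) num =>
        if st.2.contains num then (st.1 + 1, st.2) else (st.1, st.2 ++ [num]))
      (dup, fnd)).1
    = dup + temp.length + fnd.length - (PySem.Set.update fnd temp).length := by
  induction temp with
  | nil => intro dup fnd; simp [PySem.Set.update]
  | cons num rest ih =>
    intro dup fnd
    rw [PySem.Set.update_cons, List.foldl_cons]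
    by_cases h : num ∈ fnd
    · rw [show (if fnd.contains num = true then (dup + 1, fnd) else (dup, fnd ++ [num]))
            = (dup + 1, fnd) from by simp [h],
          ih, PySem.Set.add_of_mem h]
      simp only [List.length_cons]; push_cast; ring
    · rw [show (if fnd.contains num = true then (dup + 1, fnd) else (dup, fnd ++ [num]))
            = (dup, fnd ++ [num]) from by simp [h],
          ih, PySem.Set.add_of_not_mem h]
      simp only [List.length_cons, List.length_append, List.length_nil]; push_cast; ring

-- B's first loop is Counter, its values are the per-distinct-element counts, and the
-- second loop sums (count - 1) over them.
theorem bDup_eq (temp : List Int) :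
    ((temp.foldl
        (fun (d : PySem.Dict Int Int) num => d.insert num (d.getD num 0 + 1))
        PySem.Dict.empty).values.foldl (fun s c => s + (c - 1)) (0 : Int))
    = (temp.length : Int) - (PySem.Set.ofList temp).length := by
  rw [PySem.Dict.foldl_insert_getD_add_one_eq_counter]
  have hv : (PySem.Dict.counter temp).values
      = (PySem.Set.ofList temp).map (fun k => (temp.count k : Int)) := by
    show (PySem.Dict.counter temp).items.map (·.2) = _
    rw [PySem.Dict.items_counter]
    simp [List.map_map, Function.comp]
  have hsum : ((PySem.Set.ofList temp).map (fun k => (temp.count k : Int))).sum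
      = (temp.length : Int) := by
    have hperm : (PySem.Set.ofList temp).Perm temp.dedup := by
      rw [List.perm_ext_iff_of_nodup (PySem.Set.nodup_ofList temp) temp.nodup_dedup]
      intro a; rw [PySem.Set.mem_ofList, List.mem_dedup]
    calc ((PySem.Set.ofList temp).map (fun k => (temp.count k : Int))).sum
        = ((temp.dedup).map (fun k => (temp.count k : Int))).sum :=
          (hperm.map _).sum_eq
      _ = (((temp.dedup).map (fun k => temp.count k)).sum : Int) :=
          sum_map_cast _ _
      _ = (temp.length : Int) := by rw [List.sum_map_count_dedup_eq_length]
  rw [hv, PySem.List.foldl_add]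
  rw [show ((PySem.Set.ofList temp).map (fun k => (temp.count k : Int))).map (fun c => c - 1)
        = (PySem.Set.ofList temp).map (fun k => (temp.count k : Int) - 1) from by
      simp [List.map_map, Function.comp]]
  rw [show (PySem.Set.ofList temp).map (fun k => (temp.count k : Int) - 1)
        = ((PySem.Set.ofList temp).map (fun k => (temp.count k : Int))).map (fun c => c - 1) from by
      simp [List.map_map, Function.comp]]
  rw [sum_map_sub_one, hsum]
  simp

-- ===== VERDICT (by name: the statement is the Claim_ definition above) =====
theorem merge_or_not_spec : Claim_equal_merge_or_not := by
  intro combo_set combo inter_count _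
  show merge_or_not combo_set combo inter_count = merge_or_not_alt combo_set combo inter_count
  show (if (List.foldl
      (fun (st : Int × List Int) num =>
        if st.2.contains num then (st.1 + 1, st.2) else (st.1, st.2 ++ [num]))
      ((0 : Int), ([] : List Int)) (combo_set ++ combo)).1 ≤ inter_count then true else false)
    = decide ((((combo_set ++ combo).foldl
        (fun (d : PySem.Dict Int Int) num => d.insert num (d.getD num 0 + 1))
        PySem.Dict.empty).values.foldl (fun s c => s + (c - 1)) (0 : Int)) ≤ inter_count)
  rw [aLoop_fst, bDup_eq, PySem.Set.update_nil_left]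
  simp only [List.length_nil, Nat.cast_zero, add_zero, zero_add]
  split_ifs with h
  · exact (decide_eq_true h).symm
  · exact (decide_eq_false h).symm
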